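-- pv_equiv track=rewrite | github.com/jk-jung/problem-solving | codewars/7kyu/7_Mutate My Strings.py | mutate_my_strings
-- ===== SOURCE A (Python) =====
-- def mutate_my_strings(s1,s2):
--     r = [s1]
--     t = list(s1)
--     for i in range(len(s1)):
--         if s1[i] == s2[i]:continue
--         t[i] = s2[i]
--         r.append(''.join(t))
--     return '\n'.join(r) + '\n'
-- ===== SOURCE B (Python) =====
-- def mutate_my_strings(s1, s2):
--     lines = [s1] + [s2[:i+1] + s1[i+1:]
--                     for i in range(len(s1)) if s1[i] != s2[i]]
--     return '\n'.join(lines) + '\n'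
-- ===== Notes on version B (the rewrite author's own statement) =====
-- stated objective: simpler
-- what changed: Each output line is computed directly as the slice concatenation s2[:i+1] + s1[i+1:] from the two original strings, replacing A's incrementally mutated character list and join of that buffer.
import Mathlib
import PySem

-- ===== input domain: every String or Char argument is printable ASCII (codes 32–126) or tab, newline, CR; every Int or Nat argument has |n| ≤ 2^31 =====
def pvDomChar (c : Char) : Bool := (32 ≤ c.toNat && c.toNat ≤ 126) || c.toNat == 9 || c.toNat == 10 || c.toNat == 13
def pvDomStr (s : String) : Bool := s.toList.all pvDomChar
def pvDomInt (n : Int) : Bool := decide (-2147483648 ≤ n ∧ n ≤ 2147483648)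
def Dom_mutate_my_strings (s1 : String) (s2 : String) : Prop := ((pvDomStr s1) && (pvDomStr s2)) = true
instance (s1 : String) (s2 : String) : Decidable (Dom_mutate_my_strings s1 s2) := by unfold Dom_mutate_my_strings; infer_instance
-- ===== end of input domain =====

-- B builds each line directly by slicing the two original strings instead of
-- maintaining A's incrementally mutated character buffer; same output, no speed claim.

-- ===== PORT A =====
-- A: r = [s1]; t = list(s1); for i in range(len(s1)): if s1[i]==s2[i] continue;
--    t[i] = s2[i]; r.append(''.join(t));  return '\n'.join(r) + '\n'
-- (indexing s2[i] raises IndexError when i ≥ len(s2); excluded by Pre_; the port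
--  uses getD with a dummy default there, outside the claim)
def mutate_my_strings (s1 : String) (s2 : String) : String :=
  let l1 := s1.toList
  let l2 := s2.toList
  let fin := (List.range l1.length).foldl
    (fun (st : List (List Char) × List Char) i =>
      if l1.getD i ' ' == l2.getD i ' ' then st
      else
        let t' := st.2.set i (l2.getD i ' ')
        (st.1 ++ [t'], t'))
    ([l1], l1)
  String.intercalate "\n" (fin.1.map String.ofList) ++ "\n"

-- ===== PORT B =====
-- B: lines = [s1] + [s2[:i+1] + s1[i+1:] for i in range(len(s1)) if s1[i] != s2[i]]
--    return '\n'.join(lines) + '\n'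
def mutate_my_strings_alt (s1 : String) (s2 : String) : String :=
  let l1 := s1.toList
  let l2 := s2.toList
  let lines := l1 ::
    (((List.range l1.length).filter (fun i => l1.getD i ' ' != l2.getD i ' ')).map
      (fun i => l2.take (i+1) ++ l1.drop (i+1)))
  String.intercalate "\n" (lines.map String.ofList) ++ "\n"

-- ===== PRECONDITION & SPEC =====
-- Pre_ excludes exactly the inputs where the Python A raises IndexError
-- (some loop index i < len(s1) has i ≥ len(s2)); B raises there too.
def Pre_mutate_my_strings (s1 : String) (s2 : String) : Prop :=
  s1.toList.length ≤ s2.toList.length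
instance (s1 : String) (s2 : String) : Decidable (Pre_mutate_my_strings s1 s2) := by
  unfold Pre_mutate_my_strings; infer_instance

def pvWitness_mutate_my_strings : String × String := ("abc", "axd")

def Spec_mutate_my_strings (s1 : String) (s2 : String) (out : String) : Prop := out = mutate_my_strings_alt s1 s2
instance (s1 : String) (s2 : String) (out : String) : Decidable (Spec_mutate_my_strings s1 s2 out) := by unfold Spec_mutate_my_strings; infer_instance

-- ===== CLAIM (what is proved, stated in full; the proofs are below) =====
def Claim_equal_mutate_my_strings : Prop := ∀ (s1 : String) (s2 : String), Dom_mutate_my_strings s1 s2 → Pre_mutate_my_strings s1 s2 → Spec_mutate_my_strings s1 s2 (mutate_my_strings s1 s2)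

-- ===== LEMMAS AND PROOFS =====

-- Setting position i of (l2.take i ++ l1.drop i) to l2[i] advances the split point.
lemma set_mix_succ (l1 l2 : List Char) (i : Nat) (h1 : i < l1.length) (h2 : i < l2.length) :
    (l2.take i ++ l1.drop i).set i (l2.getD i ' ') =
      l2.take (i+1) ++ l1.drop (i+1) := by
  have hlen : (List.take i l2).length = i := List.length_take_of_le (le_of_lt h2)
  rw [List.getD_eq_getElem l2 ' ' h2]
  have step1 : (List.take i l2 ++ List.drop i l1).set i (l2[i]) =
      List.take i l2 ++ (List.drop i l1).set 0 l2[i] := by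
    simp [hlen]
  rw [step1, ← List.take_concat_get, List.drop_eq_getElem_cons h1, List.set_cons_zero]
  · simp [List.concat_eq_append]
  · exact h2

-- If the characters at i agree, the split point advances for free.
lemma mix_succ_of_eq (l1 l2 : List Char) (i : Nat) (h1 : i < l1.length) (h2 : i < l2.length)
    (heq : l1[i] = l2[i]) :
    l2.take i ++ l1.drop i = l2.take (i+1) ++ l1.drop (i+1) := by
  rw [← List.take_concat_get, List.drop_eq_getElem_cons h1, heq]
  · simp [List.concat_eq_append]
  · exact h2

-- Loop invariant for A's fold over range n.
lemma foldA_invariant (l1 l2 : List Char) (hle : l1.length ≤ l2.length) :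
    ∀ n, n ≤ l1.length →
    (List.range n).foldl
      (fun (st : List (List Char) × List Char) i =>
        if l1.getD i ' ' == l2.getD i ' ' then st
        else
          let t' := st.2.set i (l2.getD i ' ')
          (st.1 ++ [t'], t'))
      ([l1], l1)
    = (l1 ::
        (((List.range n).filter (fun i => l1.getD i ' ' != l2.getD i ' ')).map
          (fun i => l2.take (i+1) ++ l1.drop (i+1))),
       l2.take n ++ l1.drop n) := by
  intro n
  induction n with
  | zero => intro _; simp
  | succ m ih =>
    intro hlt
    have hm : m ≤ l1.length := Nat.le_of_succ_le hlt
    have h1 : m < l1.length := hlt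
    have h2 : m < l2.length := lt_of_lt_of_le h1 hle
    have hg1 : l1.getD m ' ' = l1[m] := List.getD_eq_getElem l1 ' ' h1
    have hg2 : l2.getD m ' ' = l2[m] := List.getD_eq_getElem l2 ' ' h2
    rw [List.range_succ, List.foldl_append, ih hm, List.filter_append, List.map_append]
    simp only [List.foldl_cons, List.foldl_nil, List.filter_cons, List.filter_nil, hg1, hg2]
    by_cases hc : l1[m] = l2[m]
    · have hb : (l1[m] == l2[m]) = true := by simp [hc]
      simp only [hb, bne, Bool.not_true, if_true]
      rw [mix_succ_of_eq l1 l2 m h1 h2 hc]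
      simp
    · have hb : (l1[m] == l2[m]) = false := by simp [hc]
      simp only [hb, bne, Bool.not_false]
      have := set_mix_succ l1 l2 m h1 h2
      rw [List.getD_eq_getElem l2 ' ' h2] at this
      rw [this]
      simp

-- ===== VERDICT (by name: the statement is the Claim_ definition above) =====
theorem mutate_my_strings_spec : Claim_equal_mutate_my_strings := by
  intro s1 s2 _hdom hpre
  unfold Spec_mutate_my_strings mutate_my_strings mutate_my_strings_alt
  have h := foldA_invariant s1.toList s2.toList hpre s1.toList.length (le_refl _)
  simp only [h]
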